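-- pv_equiv track=rewrite | github.com/ShobhitMaheshwari/neural-network | src/video.py | create_s
-- ===== SOURCE A (Python) =====
-- def get_value(arr, x, y):
--     if x < 0 or y < 0:
--         return 0
--     if(x >= len(arr)):
--         return 0
--     if(y >= len(arr[x])):
--         return 0
--     if(arr[x][y]):
--         return 1
--     else:
--         return 0
--
-- def create_s(image):
--     a = {}
--     for x in range(0, len(image)):
--         for y in range(0, len(image[x])):
--             if(image[x][y]):
--                 a[(x,y)] = get_value(image, x - 1, y - 1) + get_value(image, x - 1, y) + get_value(image, x - 1, y + 1)\
--                     + get_value(image, x    , y - 1) + get_value(image, x    , y) + get_value(image, x    , y + 1) \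
--                     + get_value(image, x + 1, y - 1) + get_value(image, x + 1, y) + get_value(image, x + 1, y + 1)
--     return a
-- ===== SOURCE B (Python) =====
-- def create_s(image):
--     nz = [(x, y) for x, row in enumerate(image) for y, v in enumerate(row) if v]
--     on = set(nz)
--     a = dict.fromkeys(nz, 0)
--     for q in nz:
--         for dx in (-1, 0, 1):
--             for dy in (-1, 0, 1):
--                 p = (q[0] + dx, q[1] + dy)
--                 if p in on:
--                     a[p] += 1
--     return a
-- ===== Notes on version B (the rewrite author's own statement) =====
-- stated objective: alternative
-- what changed: Replaces the per-pixel gather of nine bounds-checked get_value lookups with an index-then-scatter pass: one comprehension collects the nonzero coordinates, a dict maps each to 0, and each nonzero pixel scatters +1 to whichever of its nine neighbours is itself nonzero.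
import Mathlib
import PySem

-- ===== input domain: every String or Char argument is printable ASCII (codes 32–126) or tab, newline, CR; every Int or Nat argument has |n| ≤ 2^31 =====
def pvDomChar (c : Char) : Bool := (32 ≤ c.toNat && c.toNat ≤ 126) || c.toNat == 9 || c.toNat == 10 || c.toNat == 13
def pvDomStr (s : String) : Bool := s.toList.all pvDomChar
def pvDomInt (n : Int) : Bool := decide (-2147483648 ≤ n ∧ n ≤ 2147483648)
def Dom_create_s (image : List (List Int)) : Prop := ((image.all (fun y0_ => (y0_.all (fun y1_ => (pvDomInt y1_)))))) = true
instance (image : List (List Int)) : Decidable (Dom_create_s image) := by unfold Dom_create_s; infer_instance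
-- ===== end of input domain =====

-- B replaces A's per-pixel gather of nine bounds-checked lookups by an index-then-scatter pass
-- over the list of nonzero coordinates (alternative decomposition, same return value).

-- ===== PORT A =====
-- literal transliteration of A's get_value; in-range arr[x] is ported as pyGetD (the guards make it in range)
def get_value (arr : List (List Int)) (x y : Int) : Int :=
  if x < 0 ∨ y < 0 then 0
  else if (PySem.List.len arr) ≤ x then 0
  else if (PySem.List.len (PySem.List.pyGetD arr x [])) ≤ y then 0
  else if PySem.List.pyGetD (PySem.List.pyGetD arr x []) y 0 != 0 then 1 else 0

-- literal transliteration of A: nested index loops, per nonzero pixel a 9-term gather, dict insert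
def create_s (image : List (List Int)) : List (Int × Int × Int) :=
  let a : PySem.Dict (Int × Int) Int :=
    (PySem.List.pyRange 0 (PySem.List.len image)).foldl (fun a x =>
      (PySem.List.pyRange 0 (PySem.List.len (PySem.List.pyGetD image x []))).foldl (fun a y =>
        if PySem.List.pyGetD (PySem.List.pyGetD image x []) y 0 != 0 then
          a.insert (x, y) (get_value image (x-1) (y-1) + get_value image (x-1) y + get_value image (x-1) (y+1)
            + get_value image x (y-1) + get_value image x y + get_value image x (y+1)
            + get_value image (x+1) (y-1) + get_value image (x+1) y + get_value image (x+1) (y+1))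
        else a) a)
      PySem.Dict.empty
  a.items.map (fun p => (p.1.1, p.1.2, p.2))

-- ===== PORT B =====
-- literal transliteration of B (Source B): nonzero-coordinate list, set index, zero-initialised dict, scatter +1
def create_s_alt (image : List (List Int)) : List (Int × Int × Int) :=
  let nz : List (Int × Int) :=
    (PySem.List.enumerate image).flatMap (fun xr =>
      (PySem.List.enumerate xr.2).filterMap (fun yv =>
        if yv.2 != 0 then some (xr.1, yv.1) else none))
  let on : PySem.Set (Int × Int) := PySem.Set.ofList nz
  let a0 : PySem.Dict (Int × Int) Int := nz.foldl (fun d q => d.insert q 0) PySem.Dict.empty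
  let a : PySem.Dict (Int × Int) Int := nz.foldl (fun d q =>
    ([-1, 0, 1] : List Int).foldl (fun d dx =>
      ([-1, 0, 1] : List Int).foldl (fun d dy =>
        let p := (q.1 + dx, q.2 + dy)
        if on.contains p then d.modify p 0 (· + 1) else d) d) d) a0
  a.items.map (fun p => (p.1.1, p.1.2, p.2))

-- ===== PRECONDITION & SPEC =====
def Spec_create_s (image : List (List Int)) (out : List (Int × Int × Int)) : Prop := out = create_s_alt image
instance (image : List (List Int)) (out : List (Int × Int × Int)) : Decidable (Spec_create_s image out) := by unfold Spec_create_s; infer_instance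

-- ===== CLAIM (what is proved, stated in full; the proofs are below) =====
def Claim_equal_create_s : Prop := ∀ (image : List (List Int)), Dom_create_s image → Spec_create_s image (create_s image)

-- ===== LEMMAS AND PROOFS =====

-- row-major list of nonzero coordinates, exactly as B's `nz` builds it
def pvCoords (image : List (List Int)) : List (Int × Int) :=
  (PySem.List.enumerate image).flatMap (fun xr =>
    (PySem.List.enumerate xr.2).filterMap (fun yv =>
      if yv.2 != 0 then some (xr.1, yv.1) else none))

-- the same key list, as A's nested index loops produce it
def pvKeylist (image : List (List Int)) : List (Int × Int) :=
  (PySem.List.pyRange 0 (PySem.List.len image)).flatMap (fun x =>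
    ((PySem.List.pyRange 0 (PySem.List.len (PySem.List.pyGetD image x []))).filter
      (fun y => PySem.List.pyGetD (PySem.List.pyGetD image x []) y 0 != 0)).map (fun y => (x, y)))

def pvOffs : List (Int × Int) := [(-1,-1),(-1,0),(-1,1),(0,-1),(0,0),(0,1),(1,-1),(1,0),(1,1)]

-- B's flattened scatter-event list
def pvEvents (image : List (List Int)) : List (Int × Int) :=
  (pvCoords image).flatMap (fun q =>
    (pvOffs.map (fun o => (q.1 + o.1, q.2 + o.2))).filter
      (fun p => (PySem.Set.ofList (pvCoords image)).contains p))

-- A's 9-term gather value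
def pvNbhd (image : List (List Int)) (x y : Int) : Int :=
  get_value image (x-1) (y-1) + get_value image (x-1) y + get_value image (x-1) (y+1)
    + get_value image x (y-1) + get_value image x y + get_value image x (y+1)
    + get_value image (x+1) (y-1) + get_value image (x+1) y + get_value image (x+1) (y+1)

lemma filterMap_ite {α β : Type} (p : α → Bool) (f : α → β) (l : List α) :
    l.filterMap (fun a => if p a then some (f a) else none) = (l.filter p).map f := by
  induction l with
  | nil => rfl
  | cons a l ih => by_cases h : p a <;> simp [h, ih]

lemma pvKeylist_eq (image : List (List Int)) : pvKeylist image = pvCoords image := by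
  rw [pvCoords, pvKeylist, PySem.List.enumerate_eq_map_pyRange image [], List.flatMap_map]
  congr 1
  funext x
  rw [PySem.List.enumerate_eq_map_pyRange (PySem.List.pyGetD image x []) 0, List.filterMap_map]
  rw [show ((fun yv : Int × Int => if yv.2 != 0 then some (x, yv.1) else none) ∘
        (fun j => (j, PySem.List.pyGetD (PySem.List.pyGetD image x []) j 0)))
      = (fun j => if PySem.List.pyGetD (PySem.List.pyGetD image x []) j 0 != 0
          then some (x, j) else none) from rfl]
  rw [filterMap_ite]

lemma mem_pvCoords (image : List (List Int)) (c : Int × Int) :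
    c ∈ pvCoords image ↔ 0 ≤ c.1 ∧ c.1 < PySem.List.len image ∧ 0 ≤ c.2
      ∧ c.2 < PySem.List.len (PySem.List.pyGetD image c.1 [])
      ∧ PySem.List.pyGetD (PySem.List.pyGetD image c.1 []) c.2 0 ≠ 0 := by
  simp only [pvCoords, List.mem_flatMap, List.mem_filterMap, PySem.List.mem_enumerate_iff]
  constructor
  · rintro ⟨xr, ⟨k, hk, rfl⟩, yv, ⟨j, hj, rfl⟩, hite⟩
    simp only [zero_add] at hite ⊢
    split at hite
    · rename_i hval
      cases hite
      have hrow : PySem.List.pyGetD image ((k : Nat) : Int) [] = image[k] := by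
        rw [PySem.List.pyGetD_natCast, List.getD_eq_getElem _ _ hk]
      simp only [bne_iff_ne, ne_eq] at hval
      refine ⟨Int.natCast_nonneg k, ?_, Int.natCast_nonneg j, ?_, ?_⟩
      · simp only [PySem.List.len]; exact_mod_cast hk
      · rw [hrow]; simp only [PySem.List.len]; exact_mod_cast hj
      · rw [hrow, PySem.List.pyGetD_natCast, List.getD_eq_getElem _ _ hj]; exact hval
    · exact absurd hite (by simp)
  · rintro ⟨h1, h2, h3, h4, h5⟩
    simp only [PySem.List.len] at h2 h4
    have hk : c.1.toNat < image.length := by omega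
    have hrow : PySem.List.pyGetD image c.1 [] = image[c.1.toNat] := by
      rw [PySem.List.pyGetD_of_nonneg _ _ h1, List.getD_eq_getElem _ _ hk]
    rw [hrow] at h4 h5
    have hj : c.2.toNat < image[c.1.toNat].length := by omega
    rw [PySem.List.pyGetD_of_nonneg _ _ h3, List.getD_eq_getElem _ _ hj] at h5
    refine ⟨(c.1, image[c.1.toNat]), ⟨c.1.toNat, hk, by simp [Int.toNat_of_nonneg h1]⟩,
      (c.2, image[c.1.toNat][c.2.toNat]), ⟨c.2.toNat, hj, by simp [Int.toNat_of_nonneg h3]⟩, ?_⟩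
    rw [if_pos (by simpa [bne_iff_ne] using h5)]

lemma nodup_pvCoords (image : List (List Int)) : (pvCoords image).Nodup := by
  rw [pvCoords]
  refine List.pairwise_flatMap.mpr ⟨?_, ?_⟩
  · intro xr _
    refine List.pairwise_filterMap.mpr ?_
    refine (PySem.List.pairwise_lt_enumerate xr.2 0).imp ?_
    intro a a' hlt b hb b' hb'
    split at hb
    · cases hb
      split at hb'
      · cases hb'
        simp only [ne_eq, Prod.mk.injEq, not_and]
        intro _ h2
        omega
      · exact absurd hb' (by simp)
    · exact absurd hb (by simp)
  · refine (PySem.List.pairwise_lt_enumerate image 0).imp ?_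
    intro a a' hlt x hx y hy
    obtain ⟨u, _, hu⟩ := List.mem_filterMap.mp hx
    obtain ⟨v, _, hv⟩ := List.mem_filterMap.mp hy
    split at hu
    · cases hu
      split at hv
      · cases hv
        simp only [ne_eq, Prod.mk.injEq, not_and]
        intro h _
        omega
      · exact absurd hv (by simp)
    · exact absurd hu (by simp)

lemma get_value_eq (image : List (List Int)) (a b : Int) :
    get_value image a b = if (a, b) ∈ pvCoords image then 1 else 0 := by
  by_cases hm : (a, b) ∈ pvCoords image
  · have h := (mem_pvCoords image (a, b)).mp hm
    simp only at h
    obtain ⟨h1, h2, h3, h4, h5⟩ := h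
    rw [get_value, if_neg (by omega), if_neg (by omega), if_neg (by omega),
      if_pos (by simpa [bne_iff_ne] using h5), if_pos hm]
  · rw [if_neg hm, get_value]
    split_ifs with g1 g2 g3 g4
    · rfl
    · rfl
    · rfl
    · refine absurd ?_ hm
      have h := mem_pvCoords image (a, b)
      dsimp only at h
      exact h.mpr ⟨by omega, by omega, by omega, by omega, by simpa [bne_iff_ne] using g4⟩
    · rfl

lemma count_nodup {α : Type} [BEq α] [LawfulBEq α] (l : List α) (hl : l.Nodup) (x : α) :
    l.count x = if x ∈ l then 1 else 0 := by
  split_ifs with h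
  · exact List.count_eq_one_of_mem hl h
  · exact List.count_eq_zero.mpr h

lemma sum_map_add_nat {α : Type} (l : List α) (f g : α → Nat) :
    (l.map (fun x => f x + g x)).sum = (l.map f).sum + (l.map g).sum := by
  induction l with
  | nil => rfl
  | cons a l ih => simp only [List.map_cons, List.sum_cons, ih]; omega

lemma sum_ind (l : List (Int × Int)) (c : Int × Int) (dx dy : Int) :
    (l.map (fun q => if q.1 + dx = c.1 ∧ q.2 + dy = c.2 then (1 : Nat) else 0)).sum
      = l.count (c.1 - dx, c.2 - dy) := by
  induction l with
  | nil => rfl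
  | cons q l ih =>
    have hiff : (q.1 + dx = c.1 ∧ q.2 + dy = c.2) ↔ (q = (c.1 - dx, c.2 - dy)) := by
      rw [Prod.ext_iff]; simp only; omega
    simp only [List.map_cons, List.sum_cons, List.count_cons, ih, hiff, beq_iff_eq]
    split_ifs <;> omega

lemma count_pvEvents (image : List (List Int)) (c : Int × Int) (hc : c ∈ pvCoords image) :
    ((pvEvents image).count c : Int) = pvNbhd image c.1 c.2 := by
  have hcontains : (fun p => (PySem.Set.ofList (pvCoords image)).contains p) c = true :=
    (PySem.Set.contains_iff _ _).mpr ((PySem.Set.mem_ofList _ _).mpr hc)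
  rw [pvEvents, List.count_flatMap]
  have step2 : ∀ q ∈ pvCoords image,
      (List.count c ∘ fun q => (pvOffs.map (fun o => (q.1 + o.1, q.2 + o.2))).filter
        (fun p => (PySem.Set.ofList (pvCoords image)).contains p)) q
      = (fun q : Int × Int =>
          (if q.1 + -1 = c.1 ∧ q.2 + -1 = c.2 then (1 : Nat) else 0)
        + (if q.1 + -1 = c.1 ∧ q.2 + 0 = c.2 then (1 : Nat) else 0)
        + (if q.1 + -1 = c.1 ∧ q.2 + 1 = c.2 then (1 : Nat) else 0)
        + (if q.1 + 0 = c.1 ∧ q.2 + -1 = c.2 then (1 : Nat) else 0)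
        + (if q.1 + 0 = c.1 ∧ q.2 + 0 = c.2 then (1 : Nat) else 0)
        + (if q.1 + 0 = c.1 ∧ q.2 + 1 = c.2 then (1 : Nat) else 0)
        + (if q.1 + 1 = c.1 ∧ q.2 + -1 = c.2 then (1 : Nat) else 0)
        + (if q.1 + 1 = c.1 ∧ q.2 + 0 = c.2 then (1 : Nat) else 0)
        + (if q.1 + 1 = c.1 ∧ q.2 + 1 = c.2 then (1 : Nat) else 0)) q := by
    intro q _
    simp only [Function.comp_apply, List.count_filter hcontains, pvOffs, List.map_cons,
      List.map_nil, List.count_cons, List.count_nil, beq_iff_eq, Prod.ext_iff]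
    split_ifs <;> omega
  rw [List.map_congr_left step2]
  simp only [sum_map_add_nat, sum_ind]
  push_cast
  rw [pvNbhd]
  simp only [get_value_eq, count_nodup _ (nodup_pvCoords image)]
  simp only [sub_neg_eq_add, sub_zero]
  push_cast
  ring

lemma A_items (image : List (List Int)) :
    create_s image = (pvKeylist image).map (fun c => (c.1, c.2, pvNbhd image c.1 c.2)) := by
  have hfold : ((pvKeylist image).foldl
        (fun d (p : Int × Int) => d.insert p (pvNbhd image p.1 p.2)) PySem.Dict.empty).items.map
        (fun p => (p.1.1, p.1.2, p.2)) = create_s image := by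
    rw [pvKeylist, List.foldl_flatMap]
    have inner : ∀ (x : Int) (a : PySem.Dict (Int × Int) Int),
        List.foldl (fun d (p : Int × Int) => d.insert p (pvNbhd image p.1 p.2)) a
          (((PySem.List.pyRange 0 (PySem.List.len (PySem.List.pyGetD image x []))).filter
            (fun y => PySem.List.pyGetD (PySem.List.pyGetD image x []) y 0 != 0)).map (fun y => (x, y)))
        = List.foldl (fun a y =>
            if PySem.List.pyGetD (PySem.List.pyGetD image x []) y 0 != 0 then
              a.insert (x, y) (pvNbhd image x y) else a) a
            (PySem.List.pyRange 0 (PySem.List.len (PySem.List.pyGetD image x []))) := by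
      intro x a
      rw [List.foldl_map, List.foldl_filter]
    simp only [inner]
    rw [create_s]
    simp only [pvNbhd]
  rw [← hfold]
  rw [PySem.Dict.items_foldl_insert_fresh (pvKeylist image) (fun p => p)
    (fun p => pvNbhd image p.1 p.2) PySem.Dict.empty
    (fun a _ => PySem.Dict.contains_empty a)
    (by rw [List.map_id']; rw [pvKeylist_eq]; exact nodup_pvCoords image)]
  rw [show (PySem.Dict.empty : PySem.Dict (Int × Int) Int).items = [] from rfl]
  simp [Function.comp_def]

lemma getD_insert0 (c : Int × Int) : ∀ (l : List (Int × Int)) (d : PySem.Dict (Int × Int) Int),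
    d.getD c 0 = 0 → (l.foldl (fun d q => d.insert q 0) d).getD c 0 = 0 := by
  intro l
  induction l with
  | nil => intro d hd; exact hd
  | cons q l ih =>
    intro d hd
    refine ih _ ?_
    rw [PySem.Dict.getD_insert]
    split_ifs <;> simp [hd]

lemma mem_pvEvents_mem_coords (image : List (List Int)) (e : Int × Int)
    (he : e ∈ pvEvents image) : e ∈ pvCoords image := by
  rw [pvEvents] at he
  obtain ⟨q, _, hq⟩ := List.mem_flatMap.mp he
  have := (List.mem_filter.mp hq).2
  exact (PySem.Set.mem_ofList _ _).mp ((PySem.Set.contains_iff _ _).mp this)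

lemma B_items (image : List (List Int)) :
    create_s_alt image = (pvCoords image).map
      (fun c => (c.1, c.2, (0 : Int) + ((pvEvents image).count c : Int))) := by
  have ha0 : ((pvCoords image).foldl (fun d (q : Int × Int) => d.insert q (0 : Int))
      PySem.Dict.empty).items = (pvCoords image).map (fun p => (p, (0 : Int))) := by
    rw [PySem.Dict.items_foldl_insert_fresh (pvCoords image) (fun p => p)
      (fun _ => (0 : Int)) PySem.Dict.empty
      (fun a _ => PySem.Dict.contains_empty a)
      (by rw [List.map_id']; exact nodup_pvCoords image)]
    rw [show (PySem.Dict.empty : PySem.Dict (Int × Int) Int).items = [] from rfl]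
    simp
  have hkeys0 : ((pvCoords image).foldl (fun d (q : Int × Int) => d.insert q (0 : Int))
      PySem.Dict.empty).keys = pvCoords image := by
    simp only [PySem.Dict.keys, ha0, List.map_map]
    exact List.map_id' _
  have hfold : create_s_alt image = ((pvEvents image).foldl
      (fun d (p : Int × Int) => d.modify p 0 (· + 1))
      ((pvCoords image).foldl (fun d (q : Int × Int) => d.insert q (0 : Int))
        PySem.Dict.empty)).items.map (fun p => (p.1.1, p.1.2, p.2)) := by
    rw [pvEvents, List.foldl_flatMap]
    have inner : ∀ (q : Int × Int) (d : PySem.Dict (Int × Int) Int),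
        List.foldl (fun d (p : Int × Int) => d.modify p 0 (· + 1)) d
          ((pvOffs.map (fun o => (q.1 + o.1, q.2 + o.2))).filter
            (fun p => (PySem.Set.ofList (pvCoords image)).contains p))
        = ([-1, 0, 1] : List Int).foldl (fun d dx =>
            ([-1, 0, 1] : List Int).foldl (fun d dy =>
              let p := (q.1 + dx, q.2 + dy)
              if (PySem.Set.ofList (pvCoords image)).contains p then d.modify p 0 (· + 1) else d) d) d := by
      intro q d
      rw [List.foldl_filter, List.foldl_map]
      rw [show pvOffs = ([-1, 0, 1] : List Int).flatMap
        (fun dx => ([-1, 0, 1] : List Int).map (fun dy => (dx, dy))) from rfl]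
      rw [List.foldl_flatMap]
      simp only [List.foldl_map]
    simp only [inner]
    rw [create_s_alt]
    rfl
  rw [hfold]
  have hkeys : ((pvEvents image).foldl (fun d (p : Int × Int) => d.modify p 0 (· + 1))
      ((pvCoords image).foldl (fun d (q : Int × Int) => d.insert q (0 : Int))
        PySem.Dict.empty)).keys = pvCoords image := by
    rw [PySem.Dict.keys_foldl_modify (pvEvents image) 0 (fun _ _ => (· + 1))]
    rw [hkeys0, PySem.Set.update_eq_append_filter]
    rw [List.filter_eq_nil_iff.mpr, List.append_nil]
    intro e he
    have hmem : e ∈ pvCoords image := mem_pvEvents_mem_coords image e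
      ((PySem.Set.mem_ofList _ _).mp he)
    simpa using hmem
  rw [PySem.Dict.items_eq_map_keys _ (by rw [hkeys]; exact nodup_pvCoords image) 0]
  rw [hkeys, List.map_map]
  apply List.map_congr_left
  intro c hc
  simp only [Function.comp_apply]
  rw [PySem.Dict.getD_foldl_modify_add_one]
  rw [getD_insert0 c (pvCoords image) PySem.Dict.empty (PySem.Dict.getD_empty c 0)]

-- ===== VERDICT (by name: the statement is the Claim_ definition above) =====
theorem create_s_spec : Claim_equal_create_s := by
  intro image _
  unfold Spec_create_s
  rw [A_items, pvKeylist_eq, B_items]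
  apply List.map_congr_left
  intro c hc
  rw [← count_pvEvents image c hc, zero_add]
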